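-- pv_equiv track=rewrite | github.com/JinhuanLei/QLearning | featurebaseqlearning.py | getGoalPosition
-- ===== SOURCE A (Python) =====
-- def getGoalPosition(maze):
--     position = [0, 0]
--     for x in range(len(maze)):
--         for y in range(len(maze[x])):
--             if maze[x][y] == "G":
--                 position[0] = x
--                 position[1] = y
--     return position
-- ===== SOURCE B (Python) =====
-- def getGoalPosition(maze):
--     for x in range(len(maze) - 1, -1, -1):
--         row = maze[x]
--         for y in range(len(row) - 1, -1, -1):
--             if row[y] == "G":
--                 return [x, y]
--     return [0, 0]
-- ===== Notes on version B (the rewrite author's own statement) =====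
-- stated objective: alternative
-- what changed: Scans the grid backwards (reverse row-major) and returns on the first 'G' found, instead of scanning every cell forward while overwriting the last match.
import Mathlib
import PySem

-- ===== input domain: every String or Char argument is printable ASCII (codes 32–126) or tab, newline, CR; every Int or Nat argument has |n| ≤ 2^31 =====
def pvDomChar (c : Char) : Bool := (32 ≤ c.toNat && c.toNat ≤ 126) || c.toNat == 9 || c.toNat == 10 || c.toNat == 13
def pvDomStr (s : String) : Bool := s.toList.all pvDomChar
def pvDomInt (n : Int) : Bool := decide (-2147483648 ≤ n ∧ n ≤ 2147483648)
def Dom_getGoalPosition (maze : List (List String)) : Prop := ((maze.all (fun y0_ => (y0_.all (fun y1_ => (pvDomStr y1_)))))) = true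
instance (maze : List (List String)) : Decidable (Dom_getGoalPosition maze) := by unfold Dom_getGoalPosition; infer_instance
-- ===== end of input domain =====

-- ===== PORT A =====
-- pos updated by two nested loops over range(len); [0,0] initial.
def getGoalPosition (maze : List (List String)) : List Int :=
  (List.range maze.length).foldl (fun p x =>
    (List.range (maze.getD x []).length).foldl (fun p y =>
      if (maze.getD x []).getD y "" == "G" then [(x : Int), (y : Int)] else p) p) [0, 0]

-- ===== PORT B =====
-- inner reverse loop: checks indices y-1, y-2, …, 0 of row, returns first 'G' index
def pvRowLast (row : List String) : Nat → Option Nat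
  | 0 => none
  | y + 1 => if row.getD y "" == "G" then some y else pvRowLast row y

-- outer reverse loop: rows x-1, …, 0
def pvMazeLast (maze : List (List String)) : Nat → Option (Nat × Nat)
  | 0 => none
  | x + 1 =>
    match pvRowLast (maze.getD x []) (maze.getD x []).length with
    | some y => some (x, y)
    | none => pvMazeLast maze x

def getGoalPosition_alt (maze : List (List String)) : List Int :=
  match pvMazeLast maze maze.length with
  | some (x, y) => [(x : Int), (y : Int)]
  | none => [0, 0]

-- ===== PRECONDITION & SPEC =====
def Spec_getGoalPosition (maze : List (List String)) (out : List Int) : Prop := out = getGoalPosition_alt maze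
instance (maze : List (List String)) (out : List Int) : Decidable (Spec_getGoalPosition maze out) := by unfold Spec_getGoalPosition; infer_instance

-- ===== CLAIM (what is proved, stated in full; the proofs are below) =====
def Claim_equal_getGoalPosition : Prop := ∀ (maze : List (List String)), Dom_getGoalPosition maze → Spec_getGoalPosition maze (getGoalPosition maze)

-- ===== LEMMAS AND PROOFS =====

-- ===== VERDICT (by name: the statement is the Claim_ definition above) =====
-- inner fold over range n with init p equals: last 'G' index below n if any, else p
theorem inner_eq (row : List String) (x : Nat) (n : Nat) (p : List Int) :
    (List.range n).foldl (fun p y => if row.getD y "" == "G" then [(x : Int), (y : Int)] else p) p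
      = match pvRowLast row n with
        | some y => [(x : Int), (y : Int)]
        | none => p := by
  induction n with
  | zero => simp [pvRowLast]
  | succ n ih =>
    rw [List.range_succ, List.foldl_append]
    simp only [List.foldl_cons, List.foldl_nil, pvRowLast]
    split_ifs with h
    · rfl
    · exact ih

theorem outer_eq (maze : List (List String)) (m : Nat) :
    (List.range m).foldl (fun p x =>
        (List.range (maze.getD x []).length).foldl (fun p y =>
          if (maze.getD x []).getD y "" == "G" then [(x : Int), (y : Int)] else p) p) [0, 0]
      = match pvMazeLast maze m with
        | some (x, y) => [(x : Int), (y : Int)]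
        | none => [0, 0] := by
  induction m with
  | zero => simp [pvMazeLast]
  | succ m ih =>
    rw [List.range_succ, List.foldl_append]
    simp only [List.foldl_cons, List.foldl_nil, pvMazeLast]
    rw [inner_eq, ih]
    cases pvRowLast (maze.getD m []) (maze.getD m []).length <;> simp

theorem getGoalPosition_spec : Claim_equal_getGoalPosition := by
  intro maze _
  show getGoalPosition maze = getGoalPosition_alt maze
  unfold getGoalPosition getGoalPosition_alt
  rw [outer_eq]
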